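-- pv_equiv track=rewrite | github.com/pypi-data/pypi-mirror-185 | packages/pymbse/pymbse-0.0.22.tar.gz/pymbse-0.0.22/pymbse/query/model_api/executor/notebook_converter.py | extract_parameter_lines
-- ===== SOURCE A (Python) =====
-- SOURCE_CELL_KEYWORD = "source"
--
-- def extract_parameter_lines(cells_with_parameters: list) -> list:
--     """Function extracting parameter lines from a list of cells with parameters. In case there is a comment in a
--     parameter line, an AttributeError is raised.
--
--     :param cells_with_parameters: a list of cells with parameters
--     :return: a list of lines with parameters
--     """
--
--     # extract parameter code lines
--     param_code_lines = []
--     for cell in cells_with_parameters: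
--         for line in cell[SOURCE_CELL_KEYWORD]:
--             param_code_lines.append(line.replace("\n", ""))
--
--     # remove comments
--     param_code_lines = _remove_comments_from_lines(param_code_lines)
--
--     # strip trailing whitespace characters
--     param_code_lines = [param_code_line.strip() for param_code_line in param_code_lines]
--
--     # remove empty code lines
--     param_code_lines = [
--         param_code_line
--         for param_code_line in param_code_lines
--         if param_code_line.strip()
--     ]
--
--     return param_code_lines
--
-- def _remove_comments_from_lines(code_lines: list[str]) -> list[str]:
--     return [_remove_comment(code_line) for code_line in code_lines]
--
-- def _remove_comment(code_line):
--     if "#" in code_line: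
--         comment_to_remove = code_line[code_line.index("#") :]
--         return code_line.replace(comment_to_remove, "")
--     else:
--         return code_line
-- ===== SOURCE B (Python) =====
-- SOURCE_CELL_KEYWORD = "source"
--
--
-- def extract_parameter_lines(cells_with_parameters: list) -> list:
--     """Single character-level pass per line: drop newlines, stop at the first
--     '#', strip, and keep the line only if something remains."""
--     result = []
--     for cell in cells_with_parameters:
--         for line in cell[SOURCE_CELL_KEYWORD]:
--             chars = []
--             for ch in line:
--                 if ch == "#":
--                     break
--                 if ch != "\n":
--                     chars.append(ch)
--             stripped = "".join(chars).strip()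
--             if stripped:
--                 result.append(stripped)
--     return result
-- ===== Notes on version B (the rewrite author's own statement) =====
-- stated objective: simpler
-- what changed: A's four separate passes (collect lines while deleting newlines, remove comments via index/replace, strip each line, filter empty lines) are fused into a single character-level scan per line that breaks at the first '#' and skips newline characters.
import Mathlib
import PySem

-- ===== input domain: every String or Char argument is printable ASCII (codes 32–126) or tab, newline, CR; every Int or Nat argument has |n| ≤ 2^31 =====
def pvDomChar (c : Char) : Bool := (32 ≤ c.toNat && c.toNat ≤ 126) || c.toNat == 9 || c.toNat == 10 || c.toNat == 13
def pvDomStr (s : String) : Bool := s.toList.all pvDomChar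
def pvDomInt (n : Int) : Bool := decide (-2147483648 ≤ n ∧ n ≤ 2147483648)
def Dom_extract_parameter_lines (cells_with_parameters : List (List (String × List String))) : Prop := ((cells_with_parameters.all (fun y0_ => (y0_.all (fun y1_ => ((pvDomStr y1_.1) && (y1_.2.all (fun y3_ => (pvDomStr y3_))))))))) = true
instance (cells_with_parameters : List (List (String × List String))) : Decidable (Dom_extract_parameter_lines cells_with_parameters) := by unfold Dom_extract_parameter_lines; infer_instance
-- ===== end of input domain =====

-- B fuses A's four list passes into one character-level scan per line (break at the first '#', skip newlines); return values proved equal on Pre_ (cells that have a "source" key).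


-- ===== PORT A =====
-- _remove_comment: truncate at the first '#' via index/slice/replace, as in the Python
def pvRemoveComment (code_line : String) : String :=
  if PySem.Str.isIn "#" code_line then
    let comment_to_remove := PySem.Str.slice code_line (some (PySem.Str.find code_line "#")) none
    PySem.Str.replace code_line comment_to_remove ""
  else code_line

def pvRemoveCommentsFromLines (code_lines : List String) : List String :=
  code_lines.map pvRemoveComment

def extract_parameter_lines (cells_with_parameters : List (List (String × List String))) : List String :=
  -- pass 1: collect lines, deleting newline characters (cell["source"]: KeyError excluded by Pre_)
  let param_code_lines :=
    cells_with_parameters.foldl (fun acc cell =>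
      ((PySem.Dict.mk cell).getD "source" []).foldl
        (fun acc2 line => acc2 ++ [PySem.Str.replace line "\n" ""]) acc) []
  -- pass 2: remove comments
  let no_comments := pvRemoveCommentsFromLines param_code_lines
  -- pass 3: strip
  let stripped := no_comments.map (fun l => PySem.Str.strip l)
  -- pass 4: drop lines that are empty after stripping (Python truthiness of the stripped string)
  stripped.filter (fun l => !(PySem.Chars.strip l.toList).isEmpty)

-- ===== PORT B =====
-- the inner character loop of Source B: break at '#', skip '\n', keep everything else
def pvCleanLine (cs : List Char) : List Char :=
  match cs with
  | [] => []
  | c :: rest =>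
    if c = '#' then []
    else if c = '\n' then pvCleanLine rest
    else c :: pvCleanLine rest

def extract_parameter_lines_alt (cells_with_parameters : List (List (String × List String))) : List String :=
  cells_with_parameters.foldl (fun result cell =>
    ((PySem.Dict.mk cell).getD "source" []).foldl (fun result line =>
      let stripped := PySem.Chars.strip (pvCleanLine line.toList)
      if stripped.isEmpty then result else result ++ [String.ofList stripped]) result) []

-- ===== PRECONDITION & SPEC =====
-- Pre_ excludes only the inputs on which the Python A raises KeyError: a cell without the "source" key.
def Pre_extract_parameter_lines (cells_with_parameters : List (List (String × List String))) : Prop :=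
  (cells_with_parameters.all (fun cell => cell.any (fun kv => kv.1 == "source"))) = true
instance (cells_with_parameters : List (List (String × List String))) : Decidable (Pre_extract_parameter_lines cells_with_parameters) := by unfold Pre_extract_parameter_lines; infer_instance
def pvWitness_extract_parameter_lines : (List (List (String × List String))) := [[("source", ["x = 1  # set x\n", "   \n"])]]

def Spec_extract_parameter_lines (cells_with_parameters : List (List (String × List String))) (out : List String) : Prop := out = extract_parameter_lines_alt cells_with_parameters
instance (cells_with_parameters : List (List (String × List String))) (out : List String) : Decidable (Spec_extract_parameter_lines cells_with_parameters out) := by unfold Spec_extract_parameter_lines; infer_instance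

-- ===== CLAIM (what is proved, stated in full; the proofs are below) =====
def Claim_equal_extract_parameter_lines : Prop := ∀ (cells_with_parameters : List (List (String × List String))), Dom_extract_parameter_lines cells_with_parameters → Pre_extract_parameter_lines cells_with_parameters → Spec_extract_parameter_lines cells_with_parameters (extract_parameter_lines cells_with_parameters)

-- ===== LEMMAS AND PROOFS =====

-- replace(s, "\n", "") is the filter that drops newline characters
theorem pvReplaceGo_newline (l : List Char) : ∀ (fuel : Nat) (acc : List Char), l.length ≤ fuel →
    PySem.Chars.replace.go ['\n'] [] fuel l acc = acc.reverse ++ l.filter (fun c => c != '\n') := by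
  induction l with
  | nil =>
    intro fuel acc _
    cases fuel <;> simp [PySem.Chars.replace.go]
  | cons c t ih =>
    intro fuel acc hf
    cases fuel with
    | zero => simp at hf
    | succ f =>
      by_cases hc : c = '\n'
      · subst hc
        simp only [PySem.Chars.replace.go, List.isPrefixOf, BEq.rfl, Bool.true_and, if_pos]
        rw [show List.drop ['\n'].length ('\n' :: t) = t from rfl]
        rw [ih f ([].reverse ++ acc) (by simpa using Nat.le_of_succ_le_succ hf)]
        simp
      · have hp : (['\n'].isPrefixOf (c :: t)) = false := by
          simp [List.isPrefixOf]; exact fun h => hc h.symm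
        simp only [PySem.Chars.replace.go, hp, Bool.false_eq_true, if_neg, not_false_iff]
        rw [ih f (c :: acc) (by simpa using Nat.le_of_succ_le_succ hf)]
        simp [hc]

theorem pvReplace_newline (cs : List Char) :
    PySem.Chars.replace cs ['\n'] [] = cs.filter (fun c => c != '\n') := by
  rw [PySem.Chars.replace]
  simp only [List.isEmpty_cons, Bool.false_eq_true, if_neg, not_false_iff]
  simpa using pvReplaceGo_newline cs cs.length [] le_rfl

-- singleton prefix ↔ head
theorem pvSingletonPrefix (c : Char) (l : List Char) : [c] <+: l ↔ l.head? = some c := by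
  cases l with
  | nil => simp
  | cons x t => simp [List.cons_prefix_cons, eq_comm]

-- replace(s, s[i:], "") where s[i:] starts with the first '#': yields the part before '#'
theorem pvReplaceGo_cut (suf : List Char) (hs : suf.head? = some '#') :
    ∀ (pre : List Char) (fuel : Nat) (acc : List Char), '#' ∉ pre →
      pre.length + suf.length ≤ fuel →
      PySem.Chars.replace.go suf [] fuel (pre ++ suf) acc = acc.reverse ++ pre := by
  obtain ⟨rest, rfl⟩ : ∃ r, suf = '#' :: r := by
    cases suf with
    | nil => simp at hs
    | cons a r =>
      simp only [List.head?_cons, Option.some.injEq] at hs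
      exact ⟨r, by rw [hs]⟩
  intro pre
  induction pre with
  | nil =>
    intro fuel acc _ hf
    simp only [List.nil_append, List.length_nil, Nat.zero_add] at hf ⊢
    cases fuel with
    | zero => simp at hf
    | succ f =>
      have hpref : (('#' :: rest).isPrefixOf ('#' :: rest)) = true := by
        simp [List.isPrefixOf_iff_prefix]
      simp only [PySem.Chars.replace.go, hpref, if_pos]
      rw [show List.drop ('#' :: rest).length ('#' :: rest) = ([] : List Char) by simp]
      cases f <;> simp [PySem.Chars.replace.go]
  | cons c pre' ih =>
    intro fuel acc hmem hf
    have hc : c ≠ '#' := by intro h; exact hmem (h ▸ List.mem_cons_self)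
    cases fuel with
    | zero => simp at hf
    | succ f =>
      have hpref : (('#' :: rest).isPrefixOf (c :: (pre' ++ '#' :: rest))) = false := by
        simp [List.isPrefixOf, show ¬('#' = c) from fun h => hc h.symm]
      simp only [List.cons_append, PySem.Chars.replace.go, hpref, Bool.false_eq_true, if_neg,
        not_false_iff]
      rw [ih f (c :: acc) (fun h => hmem (List.mem_cons_of_mem _ h)) (by simp at hf ⊢; omega)]
      simp

-- no '#' before the cut ⇒ takeWhile keeps exactly the part before '#'
theorem pvTakeWhile_cut (pre suf : List Char) (hmem : '#' ∉ pre) (hs : suf.head? = some '#') :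
    (pre ++ suf).takeWhile (fun c => c != '#') = pre := by
  induction pre with
  | nil =>
    cases suf with
    | nil => simp at hs
    | cons a r =>
      simp only [List.head?_cons, Option.some.injEq] at hs
      simp [hs]
  | cons c pre' ih =>
    have hc : c ≠ '#' := by intro h; exact hmem (h ▸ List.mem_cons_self)
    simp only [List.cons_append, List.takeWhile_cons]
    simp [hc, ih (fun h => hmem (List.mem_cons_of_mem _ h))]

theorem pvTakeWhile_no_hash (cs : List Char) (h : '#' ∉ cs) :
    cs.takeWhile (fun c => c != '#') = cs := by
  induction cs with
  | nil => rfl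
  | cons c t ih =>
    have hc : c ≠ '#' := fun hh => h (hh ▸ List.mem_cons_self)
    simp only [List.takeWhile_cons]
    simp [hc, ih (fun hh => h (List.mem_cons_of_mem _ hh))]

-- _remove_comment truncates its argument at the first '#'
theorem pvRemoveComment_toList (t : String) :
    (pvRemoveComment t).toList = t.toList.takeWhile (fun c => c != '#') := by
  unfold pvRemoveComment
  by_cases h : PySem.Str.isIn "#" t = true
  · rw [if_pos h]
    have hinf : ['#'] <:+: t.toList := by
      simpa using (PySem.Str.isIn_iff_infix "#" t).mp h
    have hfind0 : 0 ≤ PySem.Chars.find t.toList ['#'] :=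
      (PySem.Chars.find_nonneg_iff t.toList ['#']).mpr hinf
    obtain ⟨hpre, hmin⟩ := PySem.Chars.find_spec (s := t.toList) (sub := ['#']) hfind0
    set i := (PySem.Chars.find t.toList ['#']).toNat with hi
    have hhead : (t.toList.drop i).head? = some '#' := (pvSingletonPrefix _ _).mp hpre
    have hnot : '#' ∉ t.toList.take i := by
      intro hmem
      obtain ⟨j, hj, hget⟩ := List.getElem_of_mem hmem
      have hjm : j < min i t.toList.length := by simpa [List.length_take] using hj
      have hj' : j < i := lt_of_lt_of_le hjm (Nat.min_le_left _ _)
      have hjl : j < t.toList.length := lt_of_lt_of_le hjm (Nat.min_le_right _ _)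
      apply hmin j hj'
      rw [pvSingletonPrefix, List.head?_drop]
      rw [List.getElem?_eq_getElem hjl]
      rw [← List.getElem_take (h := hj)]
      rw [hget]
    have hslice : (PySem.Str.slice t (some (PySem.Str.find t "#")) none).toList
        = t.toList.drop i := by
      rw [PySem.Str.slice]
      simp only [String.toList_ofList, PySem.Chars.slice_eq_listSlice]
      rw [show PySem.Str.find t "#" = PySem.Chars.find t.toList ['#'] from rfl]
      exact PySem.List.slice_from t.toList hfind0
    rw [PySem.Str.replace, String.toList_ofList, hslice]
    rw [show ("" : String).toList = [] from rfl]
    have hsplit : t.toList = t.toList.take i ++ t.toList.drop i := (List.take_append_drop _ _).symm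
    rw [PySem.Chars.replace]
    have hne : (t.toList.drop i).isEmpty = false := by
      cases hdrop : t.toList.drop i with
      | nil => rw [hdrop] at hhead; simp at hhead
      | cons a r => simp
    rw [if_neg (by simp [hne])]
    conv_lhs => rw [show PySem.Chars.replace.go (t.toList.drop i) [] t.toList.length t.toList []
        = PySem.Chars.replace.go (t.toList.drop i) [] t.toList.length
            (t.toList.take i ++ t.toList.drop i) [] by rw [← hsplit]]
    have hile : i ≤ t.toList.length := by
      have hle := PySem.Chars.find_le_length t.toList ['#']
      omega
    rw [pvReplaceGo_cut _ hhead _ _ _ hnot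
      (by simp only [List.length_take, List.length_drop]; omega)]
    conv_rhs => rw [hsplit]
    rw [pvTakeWhile_cut _ _ hnot hhead]
    simp
  · rw [if_neg h]
    have hmem : ('#' : Char) ∉ t.toList := by
      intro hin
      obtain ⟨s1, s2, hs⟩ := List.append_of_mem hin
      exact h ((PySem.Str.isIn_iff_infix "#" t).mpr
        (by rw [hs]; exact ⟨s1, s2, by simp⟩))
    exact (pvTakeWhile_no_hash _ hmem).symm

-- the character loop of B is: truncate at '#', then drop newlines
theorem pvCleanLine_eq (cs : List Char) :
    pvCleanLine cs = (cs.takeWhile (fun c => c != '#')).filter (fun c => c != '\n') := by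
  induction cs with
  | nil => rfl
  | cons c t ih =>
    by_cases h1 : c = '#'
    · subst h1; simp [pvCleanLine]
    · by_cases h2 : c = '\n'
      · subst h2
        simp [pvCleanLine, ih, h1]
      · simp [pvCleanLine, ih, h1, h2]

-- dropping newlines commutes with truncating at the first '#'
theorem pvFilter_takeWhile_comm (cs : List Char) :
    (cs.filter (fun c => c != '\n')).takeWhile (fun c => c != '#')
      = (cs.takeWhile (fun c => c != '#')).filter (fun c => c != '\n') := by
  induction cs with
  | nil => rfl
  | cons c t ih =>
    by_cases h1 : c = '#'
    · subst h1
      simp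
    · by_cases h2 : c = '\n'
      · subst h2
        simp [ih]
      · simp [h1, h2, ih]

-- dropWhile facts, for strip idempotence
theorem pvDropWhile_head (p : Char → Bool) (l : List Char) (c : Char)
    (h : (l.dropWhile p).head? = some c) : p c = false := by
  induction l with
  | nil => simp at h
  | cons x t ih =>
    by_cases hx : p x
    · rw [List.dropWhile_cons_of_pos hx] at h; exact ih h
    · rw [List.dropWhile_cons_of_neg hx] at h
      simp at h; subst h; simpa using hx

theorem pvDropWhile_of_head_false (p : Char → Bool) (l : List Char)
    (h : ∀ c, l.head? = some c → p c = false) : l.dropWhile p = l := by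
  cases l with
  | nil => rfl
  | cons x t => rw [List.dropWhile_cons_of_neg (by simp [h x rfl])]

theorem pvStrip_idem (u : List Char) :
    PySem.Chars.strip (PySem.Chars.strip u) = PySem.Chars.strip u := by
  simp only [PySem.Chars.strip, PySem.Chars.lstrip, PySem.Chars.rstrip]
  generalize hA : u.dropWhile PySem.Chars.isspace = A
  have hAhead : ∀ c, A.head? = some c → PySem.Chars.isspace c = false :=
    fun c hc => pvDropWhile_head _ u c (by rw [hA]; exact hc)
  generalize hy : (A.reverse.dropWhile PySem.Chars.isspace).reverse = y
  cases hY : y with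
  | nil => simp
  | cons c ys =>
    have hyA : (c :: ys) <+: A := by
      obtain ⟨s, hs⟩ := List.dropWhile_suffix (p := PySem.Chars.isspace) (l := A.reverse)
      exact ⟨s.reverse, by
        rw [← hY, ← hy, ← List.reverse_append, hs, List.reverse_reverse]⟩
    have hpc : PySem.Chars.isspace c = false := by
      obtain ⟨t2, ht2⟩ := hyA
      exact hAhead c (by rw [← ht2]; simp)
    rw [List.dropWhile_cons_of_neg (by simp [hpc])]
    have hsuf : (c :: ys).reverse.dropWhile PySem.Chars.isspace = (c :: ys).reverse := by
      rw [← hY, ← hy, List.reverse_reverse]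
      exact pvDropWhile_of_head_false _ _ (fun c' hc' => pvDropWhile_head _ _ c' hc')
    rw [hsuf, List.reverse_reverse]

-- per-line: A's pipeline value equals B's single-scan value, as strings
theorem pvLine_value (s : String) :
    PySem.Str.strip (pvRemoveComment (PySem.Str.replace s "\n" ""))
      = String.ofList (PySem.Chars.strip (pvCleanLine s.toList)) := by
  rw [PySem.Str.strip]
  apply congrArg String.ofList
  apply congrArg PySem.Chars.strip
  rw [pvRemoveComment_toList]
  have hrep : (PySem.Str.replace s "\n" "").toList = s.toList.filter (fun c => c != '\n') := by
    rw [PySem.Str.replace, String.toList_ofList]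
    rw [show ("\n" : String).toList = ['\n'] from rfl, show ("" : String).toList = [] from rfl]
    exact pvReplace_newline s.toList
  rw [hrep, pvFilter_takeWhile_comm, ← pvCleanLine_eq]

-- per-line: A's emptiness test (strip of the already-stripped line) equals B's
theorem pvLine_cond (s : String) :
    (!(PySem.Chars.strip (PySem.Str.strip
        (pvRemoveComment (PySem.Str.replace s "\n" ""))).toList).isEmpty)
      = (!(PySem.Chars.strip (pvCleanLine s.toList)).isEmpty) := by
  rw [pvLine_value, String.toList_ofList, pvStrip_idem]

-- per-cell: A's three re-scans of the collected lines collapse to B's filter+map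
theorem pvCell (L : List String) :
    ((((L.map (fun line => PySem.Str.replace line "\n" "")).map pvRemoveComment).map
        (fun l => PySem.Str.strip l)).filter (fun l => !(PySem.Chars.strip l.toList).isEmpty))
      = (L.filter (fun line => !(PySem.Chars.strip (pvCleanLine line.toList)).isEmpty)).map
          (fun line => String.ofList (PySem.Chars.strip (pvCleanLine line.toList))) := by
  induction L with
  | nil => rfl
  | cons l t ih =>
    simp only [List.map_cons, List.filter_cons, pvLine_cond l]
    by_cases h : (PySem.Chars.strip (pvCleanLine l.toList)).isEmpty
    · rw [if_neg (by simp [h]), if_neg (by simp [h]), ih]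
    · rw [if_pos (by simp [h]), if_pos (by simp [h]), List.map_cons, pvLine_value l, ih]

-- the two flatMaps agree cell by cell
theorem pvFlat (cells : List (List (String × List String))) :
    ((((cells.flatMap (fun cell => ((PySem.Dict.mk cell).getD "source" []).map
          (fun line => PySem.Str.replace line "\n" ""))).map pvRemoveComment).map
        (fun l => PySem.Str.strip l)).filter (fun l => !(PySem.Chars.strip l.toList).isEmpty))
      = cells.flatMap (fun cell =>
          (((PySem.Dict.mk cell).getD "source" []).filter
            (fun line => !(PySem.Chars.strip (pvCleanLine line.toList)).isEmpty)).map
          (fun line => String.ofList (PySem.Chars.strip (pvCleanLine line.toList)))) := by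
  induction cells with
  | nil => rfl
  | cons cell rest ih =>
    simp only [List.flatMap_cons, List.map_append, List.filter_append, ih]
    congr 1
    exact pvCell _

-- whole function: both ports are the same flatMap over cells
theorem pvMain (cells : List (List (String × List String))) :
    extract_parameter_lines cells = extract_parameter_lines_alt cells := by
  unfold extract_parameter_lines extract_parameter_lines_alt pvRemoveCommentsFromLines
  simp only [PySem.List.foldl_append_singleton_eq_map]
  rw [PySem.List.foldl_append_eq_flatMap]
  have hBfun : (fun (result : List String) (cell : List (String × List String)) =>
      ((PySem.Dict.mk cell).getD "source" []).foldl (fun result line =>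
        let stripped := PySem.Chars.strip (pvCleanLine line.toList)
        if stripped.isEmpty then result else result ++ [String.ofList stripped]) result)
    = (fun result cell => result ++
        (((PySem.Dict.mk cell).getD "source" []).filter
          (fun line => !(PySem.Chars.strip (pvCleanLine line.toList)).isEmpty)).map
        (fun line => String.ofList (PySem.Chars.strip (pvCleanLine line.toList)))) := by
    funext r cell
    rw [show (fun (result : List String) (line : String) =>
        let stripped := PySem.Chars.strip (pvCleanLine line.toList)
        if stripped.isEmpty then result else result ++ [String.ofList stripped])
      = (fun (result : List String) (line : String) =>
        if (!(PySem.Chars.strip (pvCleanLine line.toList)).isEmpty)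
        then result ++ [String.ofList (PySem.Chars.strip (pvCleanLine line.toList))]
        else result) by
      funext r' l'
      by_cases h : (PySem.Chars.strip (pvCleanLine l'.toList)).isEmpty <;> simp [h]]
    rw [PySem.List.foldl_append_if]
  rw [hBfun, PySem.List.foldl_append_eq_flatMap]
  simp only [List.nil_append]
  exact pvFlat cells

-- ===== VERDICT (by name: the statement is the Claim_ definition above) =====
theorem extract_parameter_lines_spec : Claim_equal_extract_parameter_lines := by
  intro cells _ _
  unfold Spec_extract_parameter_lines
  exact pvMain cells
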